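-- pv_equiv track=rewrite | github.com/laracmv/Codewars-exercicios | python/string/level 6/find_added.py | find_added
-- ===== SOURCE A (Python) =====
-- def find_added(st1, st2):
--     num = ""
--     for num2 in st2:
--         if num2 in st1:
--             st1 = st1.replace(num2, "",1)
--         else:
--             num += num2
--
--     num = list(num) #Transforma os numeros de st2 que nao estao em st1 em uma lista
--     org = sorted(num) #organiza do menor para o maior
--     org = "".join(org) #junta tudo em uma string
--     return org
-- ===== SOURCE B (Python) =====
-- def find_added(st1, st2):
--     a = sorted(st1)
--     b = sorted(st2)
--     i = j = 0
--     res = []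
--     while j < len(b):
--         if i < len(a):
--             if a[i] < b[j]:
--                 i += 1
--             elif a[i] == b[j]:
--                 i += 1
--                 j += 1
--             else:
--                 res.append(b[j])
--                 j += 1
--         else:
--             res.append(b[j])
--             j += 1
--     return "".join(res)
-- ===== Notes on version B (the rewrite author's own statement) =====
-- stated objective: faster
-- what changed: Replaces A's per-character membership test plus replace-scan over a shrinking st1 followed by a final sort with a sort of both strings and a single two-pointer merge that emits st2's excess characters already in order.
import Mathlib
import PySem

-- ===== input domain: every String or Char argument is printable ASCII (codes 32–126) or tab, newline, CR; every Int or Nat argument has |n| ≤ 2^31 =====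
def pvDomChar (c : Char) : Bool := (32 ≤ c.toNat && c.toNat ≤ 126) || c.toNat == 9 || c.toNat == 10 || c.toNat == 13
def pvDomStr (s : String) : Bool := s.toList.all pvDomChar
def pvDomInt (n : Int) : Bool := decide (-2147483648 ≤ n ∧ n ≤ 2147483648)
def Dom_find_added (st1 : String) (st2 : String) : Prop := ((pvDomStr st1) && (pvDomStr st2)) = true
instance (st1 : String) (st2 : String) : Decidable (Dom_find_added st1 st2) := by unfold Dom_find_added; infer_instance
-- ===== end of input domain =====

-- B sorts both strings once and extracts st2's excess characters by a single two-pointer merge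
-- (already in order), instead of A's membership-and-replace scan of a shrinking st1 plus a final
-- sort; objective: faster.

-- ===== PORT A =====
-- loop over st2: `num2 in st1` for a single char is list membership; st1.replace(num2,"",1)
-- for a single-char pattern removes the first occurrence = List.erase (exact here).
def find_added (st1 : String) (st2 : String) : String :=
  let s := st2.toList.foldl
    (fun (s : List Char × List Char) c =>
      if s.1.contains c then (s.1.erase c, s.2) else (s.1, s.2 ++ [c]))
    (st1.toList, [])
  String.mk (PySem.List.sorted s.2 (fun x => x) false)

-- ===== PORT B =====
-- B's while loop over indices i into a and j into b, transcribed as the structural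
-- recursion on the remaining suffixes of the two sorted lists (same three branches).
def pvMerge (a b : List Char) : List Char :=
  match a, b with
  | _, [] => []
  | [], c :: b' => c :: pvMerge [] b'
  | x :: a', c :: b' =>
      if x < c then pvMerge a' (c :: b')
      else if x = c then pvMerge a' b'
      else c :: pvMerge (x :: a') b'
termination_by a.length + b.length
decreasing_by all_goals (simp only [List.length_cons]; omega)

def find_added_alt (st1 : String) (st2 : String) : String :=
  String.mk (pvMerge (PySem.List.sorted st1.toList (fun x => x) false)
                     (PySem.List.sorted st2.toList (fun x => x) false))

-- ===== PRECONDITION & SPEC =====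
def Spec_find_added (st1 : String) (st2 : String) (out : String) : Prop := out = find_added_alt st1 st2
instance (st1 : String) (st2 : String) (out : String) : Decidable (Spec_find_added st1 st2 out) := by unfold Spec_find_added; infer_instance

-- ===== CLAIM =====
def Claim_equal_find_added : Prop := ∀ (st1 : String) (st2 : String), Dom_find_added st1 st2 → Spec_find_added st1 st2 (find_added st1 st2)

-- ===== LEMMAS AND PROOFS =====

-- the multiset-difference list A's loop computes: excess chars of l over rem, in l's order
def pvDiff (rem : List Char) (l : List Char) : List Char :=
  match l with
  | [] => []
  | c :: l => if c ∈ rem then pvDiff (rem.erase c) l else c :: pvDiff rem l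

theorem pvDiff_count (rem l : List Char) (x : Char) :
    (pvDiff rem l).count x = l.count x - rem.count x := by
  induction l generalizing rem with
  | nil => simp [pvDiff]
  | cons c l ih =>
    simp only [pvDiff]
    by_cases h : c ∈ rem
    · rw [if_pos h, ih]
      have hpos : 0 < rem.count c := List.count_pos_iff.mpr h
      by_cases hx : x = c
      · subst hx; rw [List.count_cons_self, List.count_erase_self]; omega
      · rw [List.count_cons_of_ne (Ne.symm hx), List.count_erase_of_ne hx]
    · rw [if_neg h]
      have h0 : rem.count c = 0 := by simpa using (List.count_eq_zero).mpr h
      by_cases hx : x = c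
      · subst hx; rw [List.count_cons_self, List.count_cons_self, ih]; omega
      · rw [List.count_cons_of_ne (Ne.symm hx), List.count_cons_of_ne (Ne.symm hx), ih]

theorem pvDiff_sublist (rem l : List Char) : (pvDiff rem l).Sublist l := by
  induction l generalizing rem with
  | nil => simp [pvDiff]
  | cons c l ih =>
    simp only [pvDiff]
    by_cases h : c ∈ rem
    · rw [if_pos h]; exact (ih (rem.erase c)).cons c
    · rw [if_neg h]; exact (ih rem).cons₂ c

-- A's loop accumulates exactly pvDiff
theorem loopA_eq (l rem acc : List Char) :
    (l.foldl (fun (s : List Char × List Char) c =>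
        if s.1.contains c then (s.1.erase c, s.2) else (s.1, s.2 ++ [c]))
      (rem, acc)).2 = acc ++ pvDiff rem l := by
  induction l generalizing rem acc with
  | nil => simp [pvDiff]
  | cons c l ih =>
    simp only [List.foldl_cons, pvDiff]
    by_cases h : c ∈ rem
    · rw [if_pos (by simpa using h), if_pos h]; exact ih _ _
    · rw [if_neg (by simpa using h), if_neg h, ih]; simp

-- sorting commutes with pvDiff: the excess of an already-sorted st2 comes out sorted
theorem sorted_pvDiff (rem l : List Char) :
    PySem.List.sorted (pvDiff rem l) (fun x => x) false
      = pvDiff rem (PySem.List.sorted l (fun x => x) false) := by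
  apply PySem.List.sorted_id_eq_of_perm_of_pairwise
  · rw [List.perm_iff_count]
    intro x
    rw [pvDiff_count, pvDiff_count]
    have : (PySem.List.sorted l (fun x => x) false).count x = l.count x :=
      (PySem.List.sorted_perm l (fun x => x) false).count_eq x
    omega
  · exact (PySem.List.sorted_pairwise l (fun x => x)).sublist
      (pvDiff_sublist rem (PySem.List.sorted l (fun x => x) false))

-- pvDiff depends on rem only through its multiset of characters
theorem pvDiff_congr_perm (rem rem' l : List Char) (h : rem.Perm rem') :
    pvDiff rem l = pvDiff rem' l := by
  induction l generalizing rem rem' with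
  | nil => simp [pvDiff]
  | cons c l ih =>
    simp only [pvDiff]
    by_cases hc : c ∈ rem
    · rw [if_pos hc, if_pos (h.mem_iff.mp hc)]
      exact ih _ _ (h.erase c)
    · rw [if_neg hc, if_neg (fun hx => hc (h.mem_iff.mpr hx)), ih _ _ h]

-- a surplus character of rem that never occurs in l does not affect pvDiff
theorem pvDiff_cons_not_mem (x : Char) (rem l : List Char) (hx : x ∉ l) :
    pvDiff (x :: rem) l = pvDiff rem l := by
  induction l generalizing rem with
  | nil => simp [pvDiff]
  | cons c l ih =>
    have hcx : ¬ c = x := fun h => hx (h ▸ List.mem_cons_self)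
    have hxl : x ∉ l := fun h => hx (List.mem_cons_of_mem c h)
    simp only [pvDiff, List.mem_cons, hcx, false_or]
    by_cases hc : c ∈ rem
    · rw [if_pos hc, if_pos hc, List.erase_cons_tail (by simp only [beq_iff_eq]; exact fun h => hcx h.symm), ih _ hxl]
    · rw [if_neg hc, if_neg hc, ih _ hxl]

-- on two sorted lists the merge computes exactly the multiset difference
theorem pvMerge_eq_pvDiff (a b : List Char)
    (ha : a.Pairwise (· ≤ ·)) (hb : b.Pairwise (· ≤ ·)) :
    pvMerge a b = pvDiff a b := by
  fun_induction pvMerge a b with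
  | case1 a => simp [pvDiff]
  | case2 c b' ih =>
    simp only [pvDiff, List.not_mem_nil, if_false]
    rw [ih List.Pairwise.nil (List.Pairwise.sublist (List.sublist_cons_self c b') hb)]
  | case3 x a' c b' hlt ih =>
    -- x < c ≤ every element of c::b', so x never matches
    have hxnot : x ∉ c :: b' := by
      intro hx
      rcases List.mem_cons.mp hx with h | h
      · exact absurd h.symm (ne_of_gt hlt)
      · exact absurd (lt_of_lt_of_le hlt ((List.pairwise_cons.mp hb).1 x h)) (lt_irrefl x)
    rw [pvDiff_cons_not_mem x a' (c :: b') hxnot,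
      ih (List.Pairwise.sublist (List.sublist_cons_self x a') ha) hb]
  | case4 a' c b' _ ih =>
    simp only [pvDiff, List.mem_cons, true_or, if_pos, List.erase_cons_head]
    rw [ih (List.Pairwise.sublist (List.sublist_cons_self c a') ha)
          (List.Pairwise.sublist (List.sublist_cons_self c b') hb)]
  | case5 x a' c b' hnlt hne ih =>
    -- c < x ≤ every element of x::a', so c is not in x::a'
    have hcx : c < x := lt_of_le_of_ne (le_of_not_gt hnlt) (fun h => hne h.symm)
    have hcnot : c ∉ x :: a' := by
      intro hc
      rcases List.mem_cons.mp hc with h | h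
      · exact absurd h (ne_of_lt hcx)
      · exact absurd (lt_of_lt_of_le hcx ((List.pairwise_cons.mp ha).1 c h)) (lt_irrefl c)
    simp only [pvDiff, if_neg hcnot]
    rw [ih ha (List.Pairwise.sublist (List.sublist_cons_self c b') hb)]

-- ===== VERDICT =====
theorem find_added_spec : Claim_equal_find_added := by
  intro st1 st2 _
  unfold Spec_find_added
  simp only [find_added, find_added_alt]
  rw [loopA_eq, List.nil_append, sorted_pvDiff,
    pvDiff_congr_perm st1.toList (PySem.List.sorted st1.toList (fun x => x) false) _
      (PySem.List.sorted_perm st1.toList (fun x => x) false).symm,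
    pvMerge_eq_pvDiff _ _
      (PySem.List.sorted_pairwise st1.toList (fun x => x))
      (PySem.List.sorted_pairwise st2.toList (fun x => x))]
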